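-- pv_equiv track=rewrite | github.com/Godel99/PS | 프로그래머스/3/152995. 인사고과/인사고과.py | solution
-- ===== SOURCE A (Python) =====
-- def solution(scores):
--     sorted_scores = sorted(scores, key = lambda x: (-x[0], x[1]))
--     wanho = tuple(scores[0])
--     wanho_sum = sum(wanho)
--     maxs = -1
--     rank = 1
--     for f, s in sorted_scores:
--         if s < maxs:
--             if (f, s) == wanho:
--                 return -1
--             continue
--
--         maxs = s
--
--         if f + s > wanho_sum:
--             rank += 1
--
--     return rank
-- ===== SOURCE B (Python) =====
-- def solution(scores):
--     def beaten(x):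
--         return any(y[0] > x[0] and y[1] > x[1] for y in scores)
--
--     wanho = scores[0]
--     if beaten(wanho):
--         return -1
--     target = wanho[0] + wanho[1]
--     return 1 + sum(1 for x in scores if not beaten(x) and x[0] + x[1] > target)
-- ===== Notes on version B (the rewrite author's own statement) =====
-- stated objective: simpler
-- what changed: Replaces A's sort-by-(-f,s)-and-single-scan-with-running-max by a direct O(n^2) pairwise strict-domination test: a candidate is excluded iff someone strictly beats it in both scores, and the rank is 1 plus a count over the original list.
-- intended difference: On inputs whose first candidate is strictly undominated but has second score below -1, or where some strictly undominated candidate has second score below -1 and a larger score sum than the first candidate, A's running maximum (initialised to -1) wrongly skips that undominated candidate, so A returns -1 or an undercounted rank; B returns the rank determined purely by strict pairwise domination, which is the intended exclusion rule. — e.g. on solution([(0, -2)]): A returns -1, B returns 1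
import Mathlib
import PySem

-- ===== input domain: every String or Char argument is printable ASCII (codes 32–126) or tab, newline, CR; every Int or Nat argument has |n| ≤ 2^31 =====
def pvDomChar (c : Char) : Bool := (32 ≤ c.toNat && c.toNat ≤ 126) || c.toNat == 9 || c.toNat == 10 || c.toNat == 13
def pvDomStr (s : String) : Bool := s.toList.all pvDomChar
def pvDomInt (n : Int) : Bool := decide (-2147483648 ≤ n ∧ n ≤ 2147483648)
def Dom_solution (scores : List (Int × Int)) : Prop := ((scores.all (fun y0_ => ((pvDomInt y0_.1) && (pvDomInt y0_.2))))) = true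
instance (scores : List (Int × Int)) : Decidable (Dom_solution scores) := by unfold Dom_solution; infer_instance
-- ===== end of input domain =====

-- B replaces A's sort-and-scan by a direct pairwise strict-domination test;
-- objective: simpler (no speed claim). A's scan floor of -1 misjudges undominated
-- candidates with second score < -1: stated as an intended difference D_ below.


-- ===== PORT A =====
-- the for-loop of A, with early 'return -1'
def loopA (w : Int × Int) (wsum : Int) : List (Int × Int) → Int → Int → Int
  | [], _, rank => rank
  | x :: rest, maxs, rank =>
    if x.2 < maxs then
      if x = w then -1 else loopA w wsum rest maxs rank
    else
      loopA w wsum rest x.2 (if x.1 + x.2 > wsum then rank + 1 else rank)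

def solution (scores : List (Int × Int)) : Int :=
  let sorted_scores := PySem.List.sorted2 scores (fun x => -x.1) (fun x => x.2)
  match PySem.List.pyGet? scores 0 with
  | none => 0   -- scores[0] raises IndexError on []; excluded by Pre_solution
  | some wanho => loopA wanho (wanho.1 + wanho.2) sorted_scores (-1) 1

-- ===== PORT B =====
def beatenB (scores : List (Int × Int)) (x : Int × Int) : Bool :=
  scores.any (fun y => decide (y.1 > x.1) && decide (y.2 > x.2))

def solution_alt (scores : List (Int × Int)) : Int :=
  match scores with
  | [] => 0   -- scores[0] raises IndexError on []; excluded by Pre_solution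
  | w :: rest =>
    let all := w :: rest
    if beatenB all w then -1
    else 1 + (((all.filter (fun x => !beatenB all x && decide (x.1 + x.2 > w.1 + w.2))).length : Int))

-- ===== PRECONDITION & SPEC =====
-- Pre_ excludes only the empty list, on which A raises IndexError at scores[0].
def Pre_solution (scores : List (Int × Int)) : Prop := scores ≠ []
instance (scores : List (Int × Int)) : Decidable (Pre_solution scores) := by unfold Pre_solution; infer_instance
def pvWitness_solution : (List (Int × Int)) := [(2, 2), (1, 4), (3, 2), (3, 2), (2, 1)]

-- On inputs whose first candidate is strictly undominated but has second score < -1,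
-- or where some strictly undominated candidate with second score < -1 has a larger
-- score sum than the first candidate, A's running maximum (initialised to -1) wrongly
-- skips that undominated candidate, so A returns -1 resp. an undercounted rank; B
-- returns the rank determined purely by strict pairwise domination, the intended rule.
def Undom (s : List (Int × Int)) (x : Int × Int) : Prop :=
  ∀ y ∈ s, y.1 ≤ x.1 ∨ y.2 ≤ x.2
def D_solution (scores : List (Int × Int)) : Prop :=
  let w := scores.headD default
  Undom scores w ∧ ∃ x ∈ scores, x.2 < -1 ∧ Undom scores x ∧ (x = w ∨ w.1 + w.2 < x.1 + x.2)
instance (scores : List (Int × Int)) : Decidable (D_solution scores) := by unfold D_solution Undom; infer_instance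

def Spec_solution (scores : List (Int × Int)) (out : Int) : Prop := ¬ D_solution scores → out = solution_alt scores
instance (scores : List (Int × Int)) (out : Int) : Decidable (Spec_solution scores out) := by unfold Spec_solution; infer_instance

def pvDiffWitness_solution : (List (Int × Int)) := [(0, -2)]
def pvDiffWitnessOut_solution : Int × Int := (-1, 1)

-- ===== CLAIM (what is proved, stated in full; the proofs are below) =====
def Claim_unchanged_solution : Prop := ∀ (scores : List (Int × Int)), Dom_solution scores → Pre_solution scores → Spec_solution scores (solution scores)
def Claim_changed_solution : Prop := Dom_solution (pvDiffWitness_solution) ∧ Pre_solution (pvDiffWitness_solution) ∧ D_solution (pvDiffWitness_solution) ∧ solution (pvDiffWitness_solution) = pvDiffWitnessOut_solution.1 ∧ solution_alt (pvDiffWitness_solution) = pvDiffWitnessOut_solution.2 ∧ pvDiffWitnessOut_solution.1 ≠ pvDiffWitnessOut_solution.2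
def Claim_exact_solution : Prop := ∀ (scores : List (Int × Int)), Dom_solution scores → Pre_solution scores → D_solution scores → solution scores ≠ solution_alt scores

-- ===== LEMMAS AND PROOFS =====

-- A's effective skip condition: second score below the -1 floor, or strictly dominated
def exclA (scores : List (Int × Int)) (x : Int × Int) : Bool :=
  decide (x.2 < -1) || beatenB scores x

-- the strict 'before' relation sorted2 uses for key (-f, s)
def ltK (a b : Int × Int) : Bool :=
  decide ((-a.1) < (-b.1)) || (!decide ((-b.1) < (-a.1)) && decide (a.2 < b.2))

theorem sorted2_eq_foldl (scores : List (Int × Int)) :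
    PySem.List.sorted2 scores (fun x => -x.1) (fun x => x.2)
      = scores.foldl (fun acc x => PySem.List.insertBy ltK x acc) [] := rfl

theorem pairwise_insertBy (x : Int × Int) (ys : List (Int × Int))
    (h : ys.Pairwise (fun a b => ltK b a = false)) :
    (PySem.List.insertBy ltK x ys).Pairwise (fun a b => ltK b a = false) := by
  induction ys with
  | nil => simp [PySem.List.insertBy]
  | cons y ys ih =>
    rw [List.pairwise_cons] at h
    obtain ⟨hy, hys⟩ := h
    by_cases hxy : ltK x y = true
    · simp only [PySem.List.insertBy, hxy, if_pos]
      refine List.Pairwise.cons ?_ (List.Pairwise.cons hy hys)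
      intro z hz
      rcases List.mem_cons.mp hz with rfl | hz
      · revert hxy; unfold ltK; simp; omega
      · have hzy := hy z hz
        revert hxy hzy; unfold ltK; simp; omega
    · simp only [PySem.List.insertBy, hxy, if_neg, Bool.not_eq_true]
      refine List.Pairwise.cons ?_ (ih hys)
      intro z hz
      rw [PySem.List.mem_insertBy] at hz
      rcases hz with rfl | hz
      · simpa using hxy
      · exact hy z hz

theorem pairwise_sorted2 (scores : List (Int × Int)) :
    (PySem.List.sorted2 scores (fun x => -x.1) (fun x => x.2)).Pairwise
      (fun a b => ltK b a = false) := by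
  rw [sorted2_eq_foldl]
  have main : ∀ (xs acc : List (Int × Int)),
      acc.Pairwise (fun a b => ltK b a = false) →
      (xs.foldl (fun acc x => PySem.List.insertBy ltK x acc) acc).Pairwise
        (fun a b => ltK b a = false) := by
    intro xs
    induction xs with
    | nil => intro acc h; simpa using h
    | cons x xs ih => intro acc h; exact ih _ (pairwise_insertBy x acc h)
  exact main scores [] (by simp)

theorem lt_foldl_max_iff (a : Int) (P : List (Int × Int)) :
    ∀ (init : Int),
    (a < P.foldl (fun m y => max m y.2) init) ↔ (a < init ∨ ∃ y ∈ P, a < y.2) := by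
  induction P with
  | nil => intro init; simp
  | cons p P ih =>
    intro init
    simp only [List.foldl_cons, ih, List.mem_cons]
    constructor
    · rintro (h | ⟨y, hy, hlt⟩)
      · rcases lt_or_ge a init with h' | h'
        · exact Or.inl h'
        · exact Or.inr ⟨p, Or.inl rfl, by omega⟩
      · exact Or.inr ⟨y, Or.inr hy, hlt⟩
    · rintro (h | ⟨y, rfl | hy, hlt⟩)
      · exact Or.inl (by omega)
      · exact Or.inl (by omega)
      · exact Or.inr ⟨y, hy, hlt⟩

-- the skip condition of A's scan, at any split of the sorted list, is exactly exclA
theorem cond_eq_exclA (scores : List (Int × Int))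
    (P : List (Int × Int)) (x : Int × Int) (R : List (Int × Int))
    (hL : PySem.List.sorted2 scores (fun x => -x.1) (fun x => x.2) = P ++ x :: R) :
    decide (x.2 < P.foldl (fun m y => max m y.2) (-1)) = exclA scores x := by
  have hperm : (P ++ x :: R).Perm scores := by
    rw [← hL]; exact PySem.List.sorted2_perm scores _ _ false
  have hmem : ∀ y : Int × Int, y ∈ P ++ x :: R ↔ y ∈ scores :=
    fun y => hperm.mem_iff
  have hpw := pairwise_sorted2 scores
  rw [hL, List.pairwise_append] at hpw
  obtain ⟨-, hpwR, hcross⟩ := hpw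
  have hPdom : ∀ y ∈ P, x.2 < y.2 → x.1 < y.1 := by
    intro y hy hlt
    have := hcross y hy x (List.mem_cons_self)
    revert this; unfold ltK; simp; omega
  have hRnodom : ∀ y ∈ x :: R, ¬ (x.1 < y.1 ∧ x.2 < y.2) := by
    rintro y hy ⟨h1, h2⟩
    rcases List.mem_cons.mp hy with rfl | hy
    · omega
    · have := (List.pairwise_cons.mp hpwR).1 y hy
      revert this; unfold ltK; simp; omega
  have hiff : (x.2 < P.foldl (fun m y => max m y.2) (-1)) ↔
      (x.2 < -1 ∨ ∃ y ∈ scores, x.1 < y.1 ∧ x.2 < y.2) := by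
    rw [lt_foldl_max_iff]
    constructor
    · rintro (h | ⟨y, hy, hlt⟩)
      · exact Or.inl h
      · exact Or.inr ⟨y, (hmem y).mp (List.mem_append.mpr (Or.inl hy)), hPdom y hy hlt, hlt⟩
    · rintro (h | ⟨y, hys, h1, h2⟩)
      · exact Or.inl h
      · refine Or.inr ?_
        rcases List.mem_append.mp ((hmem y).mpr hys) with hy | hy
        · exact ⟨y, hy, h2⟩
        · exact absurd ⟨h1, h2⟩ (hRnodom y hy)
  unfold exclA beatenB
  rw [Bool.eq_iff_iff]
  simp only [decide_eq_true_eq, Bool.or_eq_true, List.any_eq_true, Bool.and_eq_true,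
    decide_eq_true_eq]
  rw [hiff]

-- the reference scan: A's loop with the skip condition replaced by exclA
def refLoop (domf : Int × Int → Bool) (w : Int × Int) (wsum : Int) :
    List (Int × Int) → Int → Int
  | [], rank => rank
  | x :: rest, rank =>
    if domf x then
      if x = w then -1 else refLoop domf w wsum rest rank
    else refLoop domf w wsum rest (if x.1 + x.2 > wsum then rank + 1 else rank)

theorem loopA_eq_refLoop (scores : List (Int × Int)) (w : Int × Int) (wsum : Int) :
    ∀ (L : List (Int × Int)) (maxs rank : Int),
    (∀ P x R, L = P ++ x :: R →
       decide (x.2 < P.foldl (fun m y => max m y.2) maxs) = exclA scores x) →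
    loopA w wsum L maxs rank = refLoop (exclA scores) w wsum L rank := by
  intro L
  induction L with
  | nil => intro maxs rank h; rfl
  | cons x rest ih =>
    intro maxs rank h
    have hx := h [] x rest rfl
    simp only [List.foldl_nil] at hx
    have hnext : ∀ P y R, rest = P ++ y :: R →
        decide (y.2 < P.foldl (fun m z => max m z.2) (max maxs x.2)) = exclA scores y := by
      intro P y R hPR
      have := h (x :: P) y R (by simp [hPR])
      simpa using this
    by_cases hc : x.2 < maxs
    · have hdom : exclA scores x = true := by rw [← hx]; simp [hc]
      simp only [loopA, refLoop]
      rw [if_pos hc, if_pos hdom]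
      by_cases hw : x = w
      · simp [hw]
      · simp only [if_neg hw]
        refine ih maxs rank ?_
        intro P y R hPR
        have := hnext P y R hPR
        have hmx : max maxs x.2 = maxs := by omega
        rwa [hmx] at this
    · have hdom : ¬ exclA scores x = true := by rw [← hx]; simp [hc]
      simp only [loopA, refLoop]
      rw [if_neg hc, if_neg hdom]
      refine ih x.2 _ ?_
      intro P y R hPR
      have := hnext P y R hPR
      have hmx : max maxs x.2 = x.2 := by omega
      rwa [hmx] at this

theorem refLoop_of_excluded (domf : Int × Int → Bool) (w : Int × Int) (wsum : Int)
    (hw : domf w = true) :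
    ∀ (L : List (Int × Int)) (rank : Int), w ∈ L → refLoop domf w wsum L rank = -1 := by
  intro L
  induction L with
  | nil => intro rank h; cases h
  | cons x rest ih =>
    intro rank hmem
    by_cases hd : domf x = true
    · simp only [refLoop]
      rw [if_pos hd]
      by_cases hxw : x = w
      · simp [hxw]
      · simp only [if_neg hxw]
        exact ih rank ((List.mem_cons.mp hmem).resolve_left (fun h => hxw h.symm))
    · have hxw : x ≠ w := fun h => hd (h ▸ hw)
      simp only [refLoop]
      rw [if_neg hd]
      exact ih _ ((List.mem_cons.mp hmem).resolve_left (fun h => hxw h.symm))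

theorem refLoop_count (domf : Int × Int → Bool) (w : Int × Int) (wsum : Int)
    (hw : domf w = false) :
    ∀ (L : List (Int × Int)) (rank : Int),
    refLoop domf w wsum L rank
      = rank + ((L.filter (fun x => !domf x && decide (x.1 + x.2 > wsum))).length : Int) := by
  intro L
  induction L with
  | nil => intro rank; simp [refLoop]
  | cons x rest ih =>
    intro rank
    by_cases hd : domf x = true
    · have hxw : x ≠ w := fun h => by rw [h, hw] at hd; cases hd
      simp only [refLoop]
      rw [if_pos hd, if_neg hxw, ih]
      have hp : (!domf x && decide (x.1 + x.2 > wsum)) = false := by simp [hd]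
      simp [hp]
    · simp only [refLoop]
      rw [if_neg hd, ih]
      by_cases hs : x.1 + x.2 > wsum
      · have hp : (!domf x && decide (x.1 + x.2 > wsum)) = true := by simp [hd, hs]
        rw [if_pos hs]
        simp only [List.filter_cons, hp, if_pos, List.length_cons]
        push_cast; ring
      · have hp : (!domf x && decide (x.1 + x.2 > wsum)) = false := by simp [hd, hs]
        rw [if_neg hs]
        simp [hp]

-- A, written as its effective exclusion rule exclA
theorem solution_eq_excl (w : Int × Int) (rest : List (Int × Int)) :
    solution (w :: rest)
      = (if exclA (w :: rest) w then (-1 : Int)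
         else 1 + (((w :: rest).filter
             (fun x => !exclA (w :: rest) x && decide (x.1 + x.2 > w.1 + w.2))).length : Int)) := by
  have hget : PySem.List.pyGet? (w :: rest) 0 = some w := by
    simp [PySem.List.pyGet?, PySem.List.pyIdx?]
  have hperm : (PySem.List.sorted2 (w :: rest) (fun x => -x.1) (fun x => x.2)).Perm (w :: rest) :=
    PySem.List.sorted2_perm _ _ _ false
  have hscan := loopA_eq_refLoop (w :: rest) w (w.1 + w.2)
    (PySem.List.sorted2 (w :: rest) (fun x => -x.1) (fun x => x.2)) (-1) 1
    (fun P x R hPR => cond_eq_exclA (w :: rest) P x R hPR)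
  unfold solution
  rw [hget]
  show loopA w (w.1 + w.2) (PySem.List.sorted2 (w :: rest) (fun x => -x.1) (fun x => x.2))
      (-1) 1 = _
  rw [hscan]
  by_cases hw : exclA (w :: rest) w = true
  · rw [refLoop_of_excluded _ _ _ hw _ 1 (hperm.mem_iff.mpr List.mem_cons_self)]
    rw [if_pos hw]
  · rw [refLoop_count _ _ _ (Bool.not_eq_true _ ▸ hw) _ 1, if_neg hw,
      ((hperm.filter _).length_eq : _)]

theorem beatenB_iff (scores : List (Int × Int)) (x : Int × Int) :
    beatenB scores x = true ↔ ∃ y ∈ scores, x.1 < y.1 ∧ x.2 < y.2 := by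
  unfold beatenB
  simp only [List.any_eq_true, Bool.and_eq_true, decide_eq_true_eq, gt_iff_lt]

theorem filter_len_le {α : Type} (l : List α) (p q : α → Bool)
    (h : ∀ x ∈ l, p x = true → q x = true) :
    (l.filter p).length ≤ (l.filter q).length := by
  induction l with
  | nil => simp
  | cons a l ih =>
    have ih' := ih (fun x hx => h x (List.mem_cons_of_mem a hx))
    by_cases hp : p a = true
    · have hq := h a List.mem_cons_self hp
      rw [List.filter_cons_of_pos hp, List.filter_cons_of_pos hq]
      simpa using ih'
    · rw [List.filter_cons_of_neg (by simp [hp])]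
      by_cases hq : q a = true
      · rw [List.filter_cons_of_pos hq]
        exact Nat.le_trans ih' (Nat.le_succ _)
      · rw [List.filter_cons_of_neg (by simp [hq])]
        exact ih'

theorem filter_len_lt {α : Type} (l : List α) (p q : α → Bool)
    (h : ∀ x ∈ l, p x = true → q x = true)
    (x : α) (hx : x ∈ l) (hq : q x = true) (hp : p x = false) :
    (l.filter p).length < (l.filter q).length := by
  induction l with
  | nil => cases hx
  | cons a l ih =>
    have hle := filter_len_le l p q (fun y hy => h y (List.mem_cons_of_mem a hy))
    rcases List.mem_cons.mp hx with rfl | hx'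
    · rw [List.filter_cons_of_neg (by simp [hp]), List.filter_cons_of_pos hq]
      exact Nat.lt_succ_of_le hle
    · have hlt := ih (fun y hy => h y (List.mem_cons_of_mem a hy)) hx'
      by_cases hpa : p a = true
      · have hqa := h a List.mem_cons_self hpa
        rw [List.filter_cons_of_pos hpa, List.filter_cons_of_pos hqa]
        exact Nat.succ_lt_succ hlt
      · rw [List.filter_cons_of_neg (by simp [hpa])]
        by_cases hqa : q a = true
        · rw [List.filter_cons_of_pos hqa]
          exact Nat.lt_succ_of_lt hlt
        · rw [List.filter_cons_of_neg (by simp [hqa])]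
          exact hlt

-- ===== VERDICT (by name: the statements are the Claim_ definitions above) =====
theorem solution_spec : Claim_unchanged_solution := by
  intro scores _hdom hpre
  unfold Spec_solution
  intro hnD
  obtain ⟨w, rest, rfl⟩ : ∃ w rest, scores = w :: rest := by
    cases scores with
    | nil => exact absurd rfl hpre
    | cons a l => exact ⟨a, l, rfl⟩
  rw [solution_eq_excl]
  simp only [solution_alt]
  unfold D_solution at hnD
  simp only [List.headD_cons] at hnD
  by_cases hb : beatenB (w :: rest) w = true
  · have hA : exclA (w :: rest) w = true := by unfold exclA; simp [hb]
    rw [if_pos hA, if_pos hb]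
  · have hund : Undom (w :: rest) w := by
      intro y hy
      have hc : ¬(w.1 < y.1 ∧ w.2 < y.2) :=
        fun hc => hb ((beatenB_iff _ _).mpr ⟨y, hy, hc⟩)
      omega
    have hQR : ¬∃ x ∈ w :: rest, x.2 < -1 ∧ Undom (w :: rest) x ∧
        (x = w ∨ w.1 + w.2 < x.1 + x.2) :=
      fun h => hnD ⟨hund, h⟩
    have hw2 : ¬ w.2 < -1 :=
      fun h => hQR ⟨w, List.mem_cons_self, h, hund, Or.inl rfl⟩
    have hno : ∀ x ∈ w :: rest, x.2 < -1 →
        Undom (w :: rest) x → ¬(w.1 + w.2 < x.1 + x.2) :=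
      fun x hx h2 hu hs => hQR ⟨x, hx, h2, hu, Or.inr hs⟩
    have hA : exclA (w :: rest) w = false := by
      unfold exclA; simp [hb]; omega
    rw [if_neg (by simp [hA]), if_neg hb]
    have hfe : (w :: rest).filter (fun x => !exclA (w :: rest) x && decide (x.1 + x.2 > w.1 + w.2))
        = (w :: rest).filter (fun x => !beatenB (w :: rest) x && decide (x.1 + x.2 > w.1 + w.2)) := by
      apply List.filter_congr
      intro x hx
      by_cases hbx : beatenB (w :: rest) x = true
      · have hAx : exclA (w :: rest) x = true := by unfold exclA; simp [hbx]
        simp [hAx, hbx]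
      · have hundx : Undom (w :: rest) x := by
          intro y hy
          have hc : ¬(x.1 < y.1 ∧ x.2 < y.2) :=
            fun hc => hbx ((beatenB_iff _ _).mpr ⟨y, hy, hc⟩)
          omega
        by_cases hx2 : x.2 < -1
        · have hAx : exclA (w :: rest) x = true := by unfold exclA; simp [hx2]
          have hns := hno x hx hx2 hundx
          simp [hAx, hbx]
          omega
        · have hAx : exclA (w :: rest) x = false := by
            unfold exclA; simp [hbx]; omega
          simp [hAx, hbx]
    rw [hfe]

theorem solution_changed : Claim_changed_solution := by
  unfold Claim_changed_solution; decide

theorem solution_tight : Claim_exact_solution := by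
  intro scores _hdom hpre hD
  obtain ⟨w, rest, rfl⟩ : ∃ w rest, scores = w :: rest := by
    cases scores with
    | nil => exact absurd rfl hpre
    | cons a l => exact ⟨a, l, rfl⟩
  unfold D_solution at hD
  simp only [List.headD_cons] at hD
  obtain ⟨hund, hQR⟩ := hD
  have hb : beatenB (w :: rest) w = false := by
    rw [Bool.eq_false_iff]
    intro hc
    obtain ⟨y, hy, h1, h2⟩ := (beatenB_iff _ _).mp hc
    have := hund y hy
    omega
  rw [solution_eq_excl]
  simp only [solution_alt]
  by_cases hw2 : w.2 < -1
  · have hA : exclA (w :: rest) w = true := by unfold exclA; simp [hw2]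
    rw [if_pos hA, if_neg (by simp [hb])]
    have hnn : (0 : Int) ≤ (((w :: rest).filter
        (fun x => !beatenB (w :: rest) x && decide (x.1 + x.2 > w.1 + w.2))).length : Int) :=
      Int.natCast_nonneg _
    omega
  · obtain ⟨x, hx, hx2, hundx, hcase⟩ := hQR
    have hsum : w.1 + w.2 < x.1 + x.2 :=
      hcase.resolve_left (fun he => hw2 (he ▸ hx2))
    have hA : exclA (w :: rest) w = false := by unfold exclA; simp [hb]; omega
    rw [if_neg (by simp [hA]), if_neg (by simp [hb])]
    have hbx : beatenB (w :: rest) x = false := by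
      rw [Bool.eq_false_iff]
      intro hc
      obtain ⟨y, hy, h1, h2⟩ := (beatenB_iff _ _).mp hc
      have := hundx y hy
      omega
    have hlt := filter_len_lt (w :: rest)
      (fun z => !exclA (w :: rest) z && decide (z.1 + z.2 > w.1 + w.2))
      (fun z => !beatenB (w :: rest) z && decide (z.1 + z.2 > w.1 + w.2))
      (by
        intro y hy hp
        simp only [Bool.and_eq_true, Bool.not_eq_true'] at hp ⊢
        refine ⟨?_, hp.2⟩
        have h1 := hp.1
        unfold exclA at h1
        simp only [Bool.or_eq_false_iff] at h1
        exact h1.2)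
      x hx
      (by simp only [Bool.and_eq_true, Bool.not_eq_true']; exact ⟨hbx, by simp; omega⟩)
      (by unfold exclA; simp [hx2])
    intro hcontra
    rw [Int.add_right_inj, Int.natCast_inj] at hcontra
    omega
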